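-- pv_equiv track=rewrite | github.com/Jaswanth19-596/Daily-Leetcode-Challenge | 1755-defuse-the-bomb/defuse-the-bomb.py | func
-- ===== SOURCE A (Python) =====
-- def func(arr, k):
--
--     appended_arr = arr + arr
--     n = len(arr)
--
--     i = n - k
--
--     currentSum = 0
--     res = []
--     for itr in range(i, i + abs(k)):
--
--         currentSum += appended_arr[itr]
--
--     # res.append(currentSum)
--
--     for itr in range(i + abs(k), len(appended_arr)):
--         res.append(currentSum)
--         currentSum += appended_arr[itr]
--         currentSum -= appended_arr[itr-abs(k)]
--
--     return res
-- ===== SOURCE B (Python) =====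
-- def func(arr, k):
--     n = len(arr)
--     res = []
--     for i in range(n):
--         s = 0
--         for j in range(1, abs(k) + 1):
--             s += arr[(i - j) % n]
--         res.append(s)
--     return res
-- ===== Notes on version B (the rewrite author's own statement) =====
-- stated objective: simpler
-- what changed: A slides an O(n) incremental window over a doubled array with negative-index wraparound; B computes each output independently as a direct nested sum of the |k| preceding elements using modular indexing, fixing A's truncated answer for negative k.
-- intended difference: For k < 0 (where A returns at all, i.e. 2|k| <= n) A returns a truncated list of only n-2|k| mis-aligned window sums instead of n answers; B returns the intended n circular sums of the |k| elements preceding each index. — e.g. on func([1, 2, 3, 4], -1): A returns [2, 3], B returns [4, 1, 2, 3]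
import Mathlib
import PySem

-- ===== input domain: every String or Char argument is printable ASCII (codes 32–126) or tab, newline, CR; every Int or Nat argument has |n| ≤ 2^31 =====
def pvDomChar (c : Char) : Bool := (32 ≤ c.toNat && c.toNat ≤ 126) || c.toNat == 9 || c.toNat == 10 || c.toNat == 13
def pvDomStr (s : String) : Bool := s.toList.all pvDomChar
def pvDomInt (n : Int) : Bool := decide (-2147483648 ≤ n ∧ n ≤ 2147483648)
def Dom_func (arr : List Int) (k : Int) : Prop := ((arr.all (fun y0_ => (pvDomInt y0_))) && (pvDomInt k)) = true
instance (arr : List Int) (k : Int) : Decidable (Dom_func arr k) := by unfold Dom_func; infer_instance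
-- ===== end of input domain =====

-- B computes each answer independently as a nested modular sum instead of A's incremental
-- doubled-array sliding window (objective: simpler per-index computation; not faster).

-- ===== PORT A =====
def func (arr : List Int) (k : Int) : List Int :=
  let appended := arr ++ arr
  let n : Int := (arr.length : Int)
  let i : Int := n - k
  let currentSum : Int :=
    (PySem.List.pyRange i (i + (k.natAbs : Int)) 1).foldl
      (fun s itr => s + PySem.List.pyGetD appended itr 0) 0
  let st :=
    (PySem.List.pyRange (i + (k.natAbs : Int)) ((appended.length : Int)) 1).foldl
      (fun (st : Int × List Int) itr =>
        (st.1 + PySem.List.pyGetD appended itr 0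
              - PySem.List.pyGetD appended (itr - (k.natAbs : Int)) 0,
         st.2 ++ [st.1]))
      (currentSum, [])
  st.2

-- ===== PORT B =====
def func_alt (arr : List Int) (k : Int) : List Int :=
  let n : Int := (arr.length : Int)
  (PySem.List.pyRange 0 n 1).foldl
    (fun res i =>
      res ++ [(PySem.List.pyRange 1 ((k.natAbs : Int) + 1) 1).foldl
                (fun s j => s + PySem.List.pyGetD arr (PySem.Int.mod (i - j) n) 0) 0])
    []

-- ===== PRECONDITION & SPEC =====
-- Pre_func excludes exactly the inputs where A raises IndexError: k > 3n (first-loop index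
-- n-k falls below -2n in the doubled array) and k < 0 with 2|k| > n (index n+2|k|-1 ≥ 2n).
def Pre_func (arr : List Int) (k : Int) : Prop :=
  (0 < k → k ≤ 3 * (arr.length : Int)) ∧ (k < 0 → 2 * (-k) ≤ (arr.length : Int))
instance (arr : List Int) (k : Int) : Decidable (Pre_func arr k) := by unfold Pre_func; infer_instance
def pvWitness_func : List Int × Int := ([5, 7, 1, 4], 3)

-- For k < 0 (inside Pre_, i.e. 2|k| ≤ n) A returns a truncated list of only n-2|k| mis-aligned
-- window sums instead of n answers; B returns the intended n circular sums of the |k| elements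
-- preceding each index.
def D_func (arr : List Int) (k : Int) : Prop := k < 0
instance (arr : List Int) (k : Int) : Decidable (D_func arr k) := by unfold D_func; infer_instance

def Spec_func (arr : List Int) (k : Int) (out : List Int) : Prop :=
  ¬ D_func arr k → out = func_alt arr k
instance (arr : List Int) (k : Int) (out : List Int) : Decidable (Spec_func arr k out) := by unfold Spec_func; infer_instance

def pvDiffWitness_func : List Int × Int := ([1, 2, 3, 4], -1)
def pvDiffWitnessOut_func : (List Int) × (List Int) := ([2, 3], [4, 1, 2, 3])

-- ===== CLAIM (what is proved, stated in full; the proofs are below) =====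
def Claim_unchanged_func : Prop := ∀ (arr : List Int) (k : Int), Dom_func arr k → Pre_func arr k → Spec_func arr k (func arr k)
def Claim_changed_func : Prop := Dom_func (pvDiffWitness_func.1) (pvDiffWitness_func.2) ∧ Pre_func (pvDiffWitness_func.1) (pvDiffWitness_func.2) ∧ D_func (pvDiffWitness_func.1) (pvDiffWitness_func.2) ∧ func (pvDiffWitness_func.1) (pvDiffWitness_func.2) = pvDiffWitnessOut_func.1 ∧ func_alt (pvDiffWitness_func.1) (pvDiffWitness_func.2) = pvDiffWitnessOut_func.2 ∧ pvDiffWitnessOut_func.1 ≠ pvDiffWitnessOut_func.2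
def Claim_exact_func : Prop := ∀ (arr : List Int) (k : Int), Dom_func arr k → Pre_func arr k → D_func arr k → func arr k ≠ func_alt arr k

-- ===== LEMMAS AND PROOFS =====

-- element of the doubled array, and the modular-index form B uses
def dget (arr : List Int) (m : Int) : Int := PySem.List.pyGetD (arr ++ arr) m 0
def mget (arr : List Int) (m : Int) : Int :=
  PySem.List.pyGetD arr (PySem.Int.mod m (arr.length : Int)) 0
-- A's sliding window sum ending just before position m
def winSum (arr : List Int) (k m : Int) : Int :=
  ((PySem.List.pyRange (m - k) m 1).map (dget arr)).sum

theorem winSum_slide (arr : List Int) (k m : Int) (hk : 0 ≤ k) :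
    winSum arr k (m + 1) = winSum arr k m + dget arr m - dget arr (m - k) := by
  unfold winSum
  rcases eq_or_lt_of_le hk with h0 | hpos
  · rw [← h0]
    rw [PySem.List.pyRange_one_eq_nil (by omega), PySem.List.pyRange_one_eq_nil (by omega)]
    simp
  · rw [PySem.List.pyRange_one_succ_right (by omega : m + 1 - k ≤ m)]
    rw [PySem.List.pyRange_one_cons (by omega : m - k < m)]
    have h : m + 1 - k = m - k + 1 := by omega
    rw [h]
    simp [List.map_append, List.sum_append]
    ring

theorem funcA_loop (arr : List Int) (k : Int) (hk : 0 ≤ k)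
    (upd : Int × List Int → Int → Int × List Int)
    (hupd : upd = fun st itr =>
      (st.1 + PySem.List.pyGetD (arr ++ arr) itr 0
            - PySem.List.pyGetD (arr ++ arr) (itr - (k.natAbs : Int)) 0,
       st.2 ++ [st.1]))
    (a : Int) (t : Nat) (r : List Int) :
    (PySem.List.pyRange a (a + (t : Int)) 1).foldl upd (winSum arr k a, r)
      = (winSum arr k (a + t), r ++ (List.range t).map (fun j : Nat => winSum arr k (a + (j:Int)))) := by
  induction t with
  | zero => simp
  | succ t ih =>
    have hsplit : PySem.List.pyRange a (a + ((t+1 : Nat) : Int)) 1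
        = PySem.List.pyRange a (a + (t : Int)) 1 ++ [a + t] := by
      have : a + ((t+1 : Nat) : Int) = (a + (t : Int)) + 1 := by push_cast; ring
      rw [this, PySem.List.pyRange_one_succ_right (by omega)]
    rw [hsplit, List.foldl_append, ih]
    have habs : (k.natAbs : Int) = k := by omega
    rw [hupd]
    simp only [List.range_succ]
    have hs := winSum_slide arr k (a + t) hk
    simp only [List.foldl_cons, List.foldl_nil, habs]
    have h1 : a + ((t+1:Nat) : Int) = a + t + 1 := by push_cast; ring
    rw [h1, hs]
    simp [dget, List.map_append]

theorem double_get (arr : List Int) (p : Int) (h0 : 0 < (arr.length : Int))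
    (hp0 : 0 ≤ p) (hp : p < 2 * (arr.length : Int)) :
    PySem.List.pyGetD (arr ++ arr) p 0 = PySem.List.pyGetD arr (p % (arr.length : Int)) 0 := by
  have hr0 : 0 ≤ p % (arr.length : Int) := Int.emod_nonneg p (by omega)
  have hrlt : p % (arr.length : Int) < (arr.length : Int) := Int.emod_lt_of_pos p h0
  rw [PySem.List.pyGetD_eq_getElem (arr ++ arr) (i := p) 0 (by omega) (by simp; omega)]
  rw [PySem.List.pyGetD_eq_getElem arr (i := p % (arr.length : Int)) 0 hr0 (by omega)]
  by_cases hlt : p < (arr.length : Int)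
  · have he : p % (arr.length : Int) = p := Int.emod_eq_of_lt hp0 hlt
    rw [List.getElem_append_left (by omega)]
    congr 1
    omega
  · have he : p % (arr.length : Int) = p - arr.length := by
      rw [← Int.sub_emod_right p (arr.length : Int)]
      exact Int.emod_eq_of_lt (by omega) (by omega)
    rw [List.getElem_append_right (by omega)]
    congr 1
    omega

theorem dget_eq_mget (arr : List Int) (m : Int) (h0 : 0 < (arr.length : Int))
    (hlo : -(2 * (arr.length : Int)) ≤ m) (hhi : m < 2 * (arr.length : Int)) :
    dget arr m = mget arr m := by
  rw [dget, mget, PySem.Int.mod_eq_emod_of_pos h0]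
  by_cases hm : 0 ≤ m
  · exact double_get arr m h0 hm hhi
  · have hk : m = -(((-m).toNat : Int)) := by omega
    rw [hk, PySem.List.pyGetD_neg_natCast (arr ++ arr) (-m).toNat 0 (by omega) (by simp; omega)]
    have : (arr ++ arr).length - (-m).toNat = (m + 2 * arr.length).toNat := by simp; omega
    simp only [this]
    have h2 : PySem.List.pyGetD (arr ++ arr) ((m + 2 * (arr.length : Int))) 0
        = PySem.List.pyGetD arr ((m + 2 * (arr.length : Int)) % (arr.length : Int)) 0 :=
      double_get arr _ h0 (by omega) (by omega)
    rw [PySem.List.pyGetD_eq_getElem (arr ++ arr) (i := (m + 2 * (arr.length : Int))) 0 (by omega) (by simp; omega)] at h2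
    rw [h2, ← hk]
    congr 1
    rw [show m + 2 * (arr.length : Int) = m + (arr.length : Int) * 2 by ring,
        Int.add_mul_emod_self_left]

theorem sum_map_range_eq (f : Nat → Int) (n : Nat) :
    ((List.range n).map f).sum = ∑ i ∈ Finset.range n, f i := rfl

theorem pointwise (arr : List Int) (k : Int) (j : Nat) (hk : 0 ≤ k)
    (hk3 : k ≤ 3 * (arr.length : Int)) (hj : j < arr.length) :
    winSum arr k ((arr.length : Int) + j)
      = (PySem.List.pyRange 1 ((k.natAbs : Int) + 1) 1).foldl
          (fun s j' => s + PySem.List.pyGetD arr (PySem.Int.mod ((j : Int) - j') (arr.length : Int)) 0) 0 := by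
  have h0 : 0 < (arr.length : Int) := by omega
  set n : Int := (arr.length : Int) with hn
  set K : Nat := k.natAbs with hK
  have hkK : k = (K : Int) := by omega
  rw [PySem.List.foldl_add, zero_add, winSum, PySem.List.pyRange_one, PySem.List.pyRange_one]
  have e1 : (n + (j:Int) - (n + (j:Int) - k)).toNat = K := by omega
  have e2 : (((K:Int) + 1) - 1).toNat = K := by omega
  rw [e1, e2, List.map_map, List.map_map, sum_map_range_eq, sum_map_range_eq]
  rw [← Finset.sum_range_reflect]
  apply Finset.sum_congr rfl
  intro t ht
  have ht' : t < K := Finset.mem_range.mp ht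
  simp only [Function.comp_apply]
  have hb1 : -(2 * n) ≤ n + (j:Int) - k + (K - 1 - t : Nat) := by omega
  have hb2 : n + (j:Int) - k + ((K - 1 - t : Nat) : Int) < 2 * n := by omega
  have := dget_eq_mget arr (n + (j:Int) - k + ((K - 1 - t : Nat) : Int)) h0 (by omega) (by omega)
  rw [this, mget, ← hn, PySem.Int.mod_eq_emod_of_pos h0, PySem.Int.mod_eq_emod_of_pos h0]
  have harg : (j:Int) - (1 + (t:Int)) = (n + (j:Int) - k + ((K - 1 - t : Nat) : Int)) - n := by omega
  rw [harg, Int.sub_emod_right]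

theorem main_eq (arr : List Int) (k : Int) (hk : 0 ≤ k)
    (hk3 : 0 < k → k ≤ 3 * (arr.length : Int)) : func arr k = func_alt arr k := by
  set n : Int := (arr.length : Int) with hn
  have h3 : k ≤ 3 * n := by rcases eq_or_lt_of_le hk with h | h; · omega
                            · exact hk3 h
  have habs : (k.natAbs : Int) = k := by omega
  -- A side
  have hA : func arr k = (List.range arr.length).map (fun j : Nat => winSum arr k (n + (j:Int))) := by
    unfold func
    simp only [habs, ← hn]
    have hi : n - k + k = n := by ring
    have hlen2 : ((arr ++ arr).length : Int) = n + (arr.length : Int) := by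
      simp [hn]
    have hcur : (PySem.List.pyRange (n - k) n 1).foldl
        (fun s itr => s + PySem.List.pyGetD (arr ++ arr) itr 0) 0 = winSum arr k n := by
      rw [PySem.List.foldl_add, zero_add]
      rfl
    rw [hi, hlen2, hcur]
    have := funcA_loop arr k hk _ rfl n arr.length []
    rw [habs] at this
    rw [this]
    simp
  -- B side
  have hB : func_alt arr k
      = (List.range arr.length).map (fun j : Nat =>
          (PySem.List.pyRange 1 ((k.natAbs : Int) + 1) 1).foldl
            (fun s j' => s + PySem.List.pyGetD arr (PySem.Int.mod ((j : Int) - j') n) 0) 0) := by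
    unfold func_alt
    rw [PySem.List.foldl_append_singleton_eq_map, List.nil_append, ← hn,
        PySem.List.pyRange_zero_natCast, List.map_map]
    rfl
  rw [hA, hB]
  apply List.map_congr_left
  intro j hj
  exact pointwise arr k j hk h3 (List.mem_range.mp hj)

theorem foldl_pair_len (g : Int → Int → Int) (l : List Int) (s : Int × List Int) :
    (l.foldl (fun st itr => (g st.1 itr, st.2 ++ [st.1])) s).2.length
      = s.2.length + l.length := by
  induction l generalizing s with
  | nil => simp
  | cons x xs ih => simp [List.foldl_cons, ih]; omega

theorem func_alt_len (arr : List Int) (k : Int) : (func_alt arr k).length = arr.length := by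
  unfold func_alt
  rw [PySem.List.foldl_append_singleton_eq_map, List.nil_append, List.length_map,
      PySem.List.length_pyRange_one]
  omega

theorem func_len_neg (arr : List Int) (k : Int) (hk : k < 0)
    (hpre : 2 * (-k) ≤ (arr.length : Int)) :
    (func arr k).length = arr.length - (2 * (-k)).toNat := by
  show (List.foldl _ (_, ([] : List Int)) _).2.length = _
  rw [foldl_pair_len (fun c itr => c + PySem.List.pyGetD (arr ++ arr) itr 0
        - PySem.List.pyGetD (arr ++ arr) (itr - (k.natAbs : Int)) 0)]
  rw [PySem.List.length_pyRange_one]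
  have habs : (k.natAbs : Int) = -k := by omega
  simp [habs]
  omega

-- ===== VERDICT (by name: the statement is the Claim_ definition above) =====
theorem func_spec : Claim_unchanged_func := by
  intro arr k _ hpre hnd
  have hk : 0 ≤ k := by
    unfold D_func at hnd
    omega
  exact main_eq arr k hk hpre.1

theorem func_changed : Claim_changed_func := by unfold Claim_changed_func; decide

theorem func_tight : Claim_exact_func := by
  intro arr k _ hpre hd heq
  have hk : k < 0 := hd
  have hlen := congrArg List.length heq
  rw [func_len_neg arr k hk (hpre.2 hk), func_alt_len] at hlen
  have := hpre.2 hk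
  omega
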